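-- pv_equiv track=rewrite | github.com/Qacket/Sentiment | utils.py | all_list
-- ===== SOURCE A (Python) =====
-- def all_list(arr):
--     x = {}
--     for i in set(arr):
--         x[i] = arr.count(i)
--     x = sorted(x.items(), key=lambda item: item[0], reverse=False)
--     result = []
--     for i in range(len(x)):
--         result.append(x[i][1])
--     return result
-- ===== SOURCE B (Python) =====
-- def all_list(arr):
--     result = []
--     prev = None
--     run = 0
--     for v in sorted(arr):
--         if run > 0 and prev == v:
--             run += 1
--         else:
--             if run > 0:
--                 result.append(run)
--             prev = v
--             run = 1
--     if run > 0:
--         result.append(run)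
--     return result
-- ===== Notes on version B (the rewrite author's own statement) =====
-- stated objective: faster
-- what changed: B sorts a copy of the input once and emits the counts in a single run-length pass over the sorted list, replacing A's set construction, per-distinct-element arr.count scans, dict build and items sort.
import Mathlib
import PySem

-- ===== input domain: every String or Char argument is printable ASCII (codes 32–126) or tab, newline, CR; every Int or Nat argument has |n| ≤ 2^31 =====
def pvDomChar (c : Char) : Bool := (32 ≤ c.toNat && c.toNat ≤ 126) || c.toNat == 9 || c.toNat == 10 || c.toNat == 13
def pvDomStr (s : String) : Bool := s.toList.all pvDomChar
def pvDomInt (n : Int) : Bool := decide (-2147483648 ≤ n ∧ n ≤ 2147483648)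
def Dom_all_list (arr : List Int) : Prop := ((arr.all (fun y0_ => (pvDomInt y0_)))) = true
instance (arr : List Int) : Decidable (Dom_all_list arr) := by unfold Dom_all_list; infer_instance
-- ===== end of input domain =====

-- B replaces A's per-distinct-element count scans and dict with a single sort followed by
-- one run-length pass over the sorted copy.


-- ===== PORT A =====
-- x = {}; for i in set(arr): x[i] = arr.count(i)   (the dict is only read through a key-sorted
-- items list, and its keys are distinct, so the set's hash iteration order cannot affect the result)
def all_list (arr : List Int) : List Int :=
  let x : PySem.Dict Int Int :=
    (PySem.Set.ofList arr).foldl (fun d i => d.insert i ((PySem.List.count arr i : Int))) PySem.Dict.empty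
  let xs := PySem.List.sorted x.items (fun item => item.1) false
  (PySem.List.pyRange 0 (PySem.List.len xs)).foldl
    (fun result i => result ++ [(PySem.List.pyGetD xs i (0, 0)).2]) []

-- ===== PORT B =====
-- loop body of Source B: state = (result, prev, run)
def bStep (st : List Int × Option Int × Int) (v : Int) : List Int × Option Int × Int :=
  if 0 < st.2.2 ∧ st.2.1 = some v then (st.1, st.2.1, st.2.2 + 1)
  else ((if 0 < st.2.2 then st.1 ++ [st.2.2] else st.1), some v, 1)

def all_list_alt (arr : List Int) : List Int :=
  let st := (PySem.List.sorted arr (fun x => x) false).foldl bStep ([], none, 0)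
  if 0 < st.2.2 then st.1 ++ [st.2.2] else st.1

-- ===== PRECONDITION & SPEC =====
def Spec_all_list (arr : List Int) (out : List Int) : Prop := out = all_list_alt arr
instance (arr : List Int) (out : List Int) : Decidable (Spec_all_list arr out) := by unfold Spec_all_list; infer_instance

-- ===== CLAIM (what is proved, stated in full; the proofs are below) =====
def Claim_equal_all_list : Prop := ∀ (arr : List Int), Dom_all_list arr → Spec_all_list arr (all_list arr)

-- ===== LEMMAS AND PROOFS =====

-- the counts of s per distinct value, in first-occurrence order (proof-only abbreviation)
def runsSpec (s : List Int) : List Int :=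
  (PySem.Set.ofList s).map (fun k => (PySem.List.count s k : Int))

theorem ofList_sublist (xs : List Int) : (PySem.Set.ofList xs).Sublist xs := by
  induction xs with
  | nil => simp [PySem.Set.ofList]
  | cons x xs ih =>
      rw [PySem.Set.ofList_cons]
      exact List.Sublist.cons₂ x ((List.filter_sublist.trans ih))

theorem discard_not_mem (t' : List Int) (h : Int) (h2 : h ∉ t') :
    (PySem.Set.ofList t').discard h = PySem.Set.ofList t' := by
  unfold PySem.Set.discard
  apply List.filter_eq_self.2
  intro y hy
  have : y ∈ t' := (PySem.Set.mem_ofList t' y).1 hy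
  simp
  rintro rfl; exact h2 this

-- absorbing a leading run: ofList (h :: tw ++ t') = h :: ofList t' when tw is all h and h ∉ t'
theorem ofList_run (h : Int) (tw t' : List Int) (h1 : ∀ x ∈ tw, x = h) (h2 : h ∉ t') :
    PySem.Set.ofList (h :: (tw ++ t')) = h :: PySem.Set.ofList t' := by
  induction tw with
  | nil =>
      rw [List.nil_append, PySem.Set.ofList_cons, discard_not_mem t' h h2]
  | cons y tw ih =>
      have hy : y = h := h1 y (by simp)
      subst hy
      have ihh := ih (fun x hx => h1 x (by simp [hx]))
      rw [List.cons_append, PySem.Set.ofList_cons, ihh]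
      unfold PySem.Set.discard
      simp only [List.filter_cons]
      simp
      intro a ha h
      exact h2 (h ▸ ha)

-- key decomposition of runsSpec on a sorted list
theorem runsSpec_cons (v : Int) (t : List Int)
    (hs : List.Pairwise (· ≤ ·) (v :: t)) :
    runsSpec (v :: t) =
      (1 + (PySem.List.count t v : Int)) :: runsSpec (t.dropWhile (· == v)) := by
  have hdec : t = t.takeWhile (· == v) ++ t.dropWhile (· == v) := (List.takeWhile_append_dropWhile).symm
  have h1 : ∀ x ∈ t.takeWhile (· == v), x = v := by
    intro x hx
    simpa using List.mem_takeWhile_imp hx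
  have hlt : ∀ y ∈ t.dropWhile (· == v), v < y := by
    intro y hy
    rcases ht' : t.dropWhile (· == v) with _ | ⟨y0, rest⟩
    · rw [ht'] at hy; simp at hy
    · rw [ht'] at hy
      have hy0t : y0 ∈ t := (List.dropWhile_sublist (· == v)).subset (by rw [ht']; simp)
      have hy0v : y0 ≠ v := by
        have := List.head_dropWhile_not (· == v) (l := t) (by rw [ht']; simp)
        simp only [ht', List.head_cons] at this; simpa using this
      have hvy0 : v < y0 := lt_of_le_of_ne (List.rel_of_pairwise_cons hs hy0t) (Ne.symm hy0v)
      rcases List.mem_cons.1 hy with rfl | hy2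
      · exact hvy0
      · have hp' : List.Pairwise (· ≤ ·) (t.dropWhile (· == v)) :=
          (List.Pairwise.sublist (List.dropWhile_sublist (· == v)) hs.of_cons)
        rw [ht'] at hp'
        exact lt_of_lt_of_le hvy0 (List.rel_of_pairwise_cons hp' hy2)
  have h2 : v ∉ t.dropWhile (· == v) := fun hv => lt_irrefl v (hlt v hv)
  unfold runsSpec
  rw [show v :: t = v :: (t.takeWhile (· == v) ++ t.dropWhile (· == v)) by rw [← hdec],
      ofList_run v _ _ h1 h2]
  rw [List.map_cons]
  congr 1
  · rw [← hdec]
    simp [PySem.List.count, List.count_cons]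
    omega
  · apply List.map_congr_left
    intro k hk
    have hkt' : k ∈ t.dropWhile (· == v) := (PySem.Set.mem_ofList _ k).1 hk
    have hkv : v ≠ k := ne_of_lt (hlt k hkt')
    have hktw : k ∉ t.takeWhile (· == v) := fun hkw => hkv ((h1 k hkw).symm)
    congr 1
    simp only [PySem.List.count, List.count_cons]
    rw [if_neg (by simpa using hkv), List.count_append, List.count_eq_zero.2 hktw]
    omega

-- the fold invariant for B's loop
theorem fold_run (s : List Int) (hs : List.Pairwise (· ≤ ·) s) (res : List Int) (p : Int) (r : Int)
    (hr : 0 < r) (hp : ∀ x ∈ s, p ≤ x) :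
    (let st := s.foldl bStep (res, some p, r)
     if 0 < st.2.2 then st.1 ++ [st.2.2] else st.1) =
      res ++ [r + (PySem.List.count s p : Int)] ++ runsSpec (s.dropWhile (· == p)) := by
  induction s generalizing res p r with
  | nil => simp [runsSpec, PySem.List.count, PySem.Set.ofList, hr]
  | cons v t ih =>
      simp only [List.foldl_cons]
      by_cases hv : p = v
      · subst hv
        rw [show bStep (res, some p, r) p = (res, some p, r + 1) by simp [bStep, hr]]
        have := ih hs.of_cons res p (r + 1) (by omega)
          (fun x hx => le_trans (hp p (by simp)) (List.rel_of_pairwise_cons hs hx))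
        simp only at this
        rw [this]
        have hc : (PySem.List.count (p :: t) p : Int) = PySem.List.count t p + 1 := by
          simp [PySem.List.count, List.count_cons]
        rw [hc, show List.dropWhile (· == p) (p :: t) = List.dropWhile (· == p) t by simp,
           show r + ((PySem.List.count t p : Int) + 1) = r + 1 + (PySem.List.count t p : Int) by ring]
      · rw [show bStep (res, some p, r) v = (res ++ [r], some v, 1) by
            simp [bStep, hv, hr]]
        have := ih hs.of_cons (res ++ [r]) v 1 (by omega)
          (fun x hx => List.rel_of_pairwise_cons hs hx)
        simp only at this
        rw [this]
        have hpv : p < v := lt_of_le_of_ne (hp v (by simp)) hv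
        have hc : (PySem.List.count (v :: t) p : Int) = 0 := by
          have : p ∉ v :: t := by
            intro hmem
            rcases List.mem_cons.1 hmem with rfl | hmem2
            · exact absurd rfl hv
            · exact absurd (List.rel_of_pairwise_cons hs hmem2) (by omega)
          simp [PySem.List.count, List.count_eq_zero.2 this]
        rw [hc, show List.dropWhile (· == p) (v :: t) = v :: t by
              simp [Ne.symm hv]]
        rw [runsSpec_cons v t hs]
        simp [PySem.List.count]

-- B computes runsSpec of the sorted list
theorem alt_eq_runsSpec (arr : List Int) :
    all_list_alt arr = runsSpec (PySem.List.sorted arr (fun x => x) false) := by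
  unfold all_list_alt
  have hpw : List.Pairwise (· ≤ ·) (PySem.List.sorted arr (fun x => x) false) :=
    PySem.List.sorted_pairwise arr (fun x => x)
  rcases hsv : PySem.List.sorted arr (fun x => x) false with _ | ⟨v, t⟩
  · simp [runsSpec, PySem.Set.ofList]
  · rw [hsv] at hpw
    simp only [List.foldl_cons]
    rw [show bStep ([], none, 0) v = ([], some v, 1) by simp [bStep]]
    have := fold_run t hpw.of_cons [] v 1 (by omega)
      (fun x hx => List.rel_of_pairwise_cons hpw hx)
    simp only at this
    rw [this, runsSpec_cons v t hpw]
    simp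

-- sorted distinct values of arr = distinct values of sorted arr
theorem sorted_ofList_comm (arr : List Int) :
    PySem.List.sorted (PySem.Set.ofList arr) (fun x => x) false
      = PySem.Set.ofList (PySem.List.sorted arr (fun x => x) false) := by
  apply PySem.List.eq_of_perm_of_pairwise_le_of_injective (fun x => x) (fun a b h => h)
  · rw [List.perm_ext_iff_of_nodup
      ((PySem.List.sorted_perm _ _ _).nodup_iff.2 (PySem.Set.nodup_ofList arr))
      (PySem.Set.nodup_ofList _)]
    intro a
    rw [(PySem.List.sorted_perm _ _ _).mem_iff, PySem.Set.mem_ofList, PySem.Set.mem_ofList,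
      (PySem.List.sorted_perm arr (fun x => x) false).mem_iff]
  · exact PySem.List.sorted_pairwise _ _
  · exact List.Pairwise.sublist (ofList_sublist _) (PySem.List.sorted_pairwise arr (fun x => x))

-- A computes the counts over the sorted distinct values
theorem a_eq (arr : List Int) :
    all_list arr =
      (PySem.List.sorted (PySem.Set.ofList arr) (fun x => x) false).map
        (fun k => (PySem.List.count arr k : Int)) := by
  unfold all_list
  have hitems : (((PySem.Set.ofList arr).foldl
      (fun d i => d.insert i ((PySem.List.count arr i : Int))) PySem.Dict.empty)).items
      = (PySem.Set.ofList arr).map (fun i => (i, (PySem.List.count arr i : Int))) := by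
    have := PySem.Dict.items_foldl_insert_fresh (PySem.Set.ofList arr) (fun i => i)
      (fun i => (PySem.List.count arr i : Int)) PySem.Dict.empty
      (by intro a _; simp) (by simpa using PySem.Set.nodup_ofList arr)
    simpa using this
  simp only [hitems]
  have hsorted : PySem.List.sorted
      ((PySem.Set.ofList arr).map (fun i => (i, (PySem.List.count arr i : Int))))
      (fun item => item.1) false
      = (PySem.List.sorted (PySem.Set.ofList arr) (fun x => x) false).map
          (fun i => (i, (PySem.List.count arr i : Int))) := by
    apply PySem.List.sorted_eq_of_perm_of_pairwise_lt
    · exact (PySem.List.sorted_perm _ _ _).map _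
    · rw [List.pairwise_map]
      have hnd : (PySem.List.sorted (PySem.Set.ofList arr) (fun x => x) false).Nodup :=
        (PySem.List.sorted_perm _ _ _).nodup_iff.2 (PySem.Set.nodup_ofList arr)
      have hle := PySem.List.sorted_pairwise (PySem.Set.ofList arr) (fun x => x)
      exact (hnd.imp_of_mem (fun _ _ => id)).imp₂ (fun a b hne hle => lt_of_le_of_ne hle hne) hle |>.imp (fun h => h) |>.imp (fun h => h)
  rw [hsorted, PySem.List.foldl_append_singleton_eq_map, List.nil_append]
  have hmm : (List.map
        (fun i => (PySem.List.pyGetD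
            (List.map (fun i => (i, (PySem.List.count arr i : Int)))
              (PySem.List.sorted (PySem.Set.ofList arr) (fun x => x) false)) i ((0 : Int), (0 : Int))).2)
        (PySem.List.pyRange 0
          (PySem.List.len (List.map (fun i => (i, (PySem.List.count arr i : Int)))
            (PySem.List.sorted (PySem.Set.ofList arr) (fun x => x) false)))))
      = (List.map
          (fun j => PySem.List.pyGetD
            (List.map (fun i => (i, (PySem.List.count arr i : Int)))
              (PySem.List.sorted (PySem.Set.ofList arr) (fun x => x) false)) j ((0 : Int), (0 : Int)))
          (PySem.List.pyRange 0
            (PySem.List.len (List.map (fun i => (i, (PySem.List.count arr i : Int)))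
              (PySem.List.sorted (PySem.Set.ofList arr) (fun x => x) false))))).map Prod.snd := by
    rw [List.map_map]
    rfl
  rw [hmm, PySem.List.map_pyGetD_pyRange_zero, List.map_map]
  rfl

-- ===== VERDICT (by name: the statement is the Claim_ definition above) =====
theorem all_list_spec : Claim_equal_all_list := by
  intro arr _
  unfold Spec_all_list
  rw [a_eq, alt_eq_runsSpec, runsSpec, sorted_ofList_comm]
  apply List.map_congr_left
  intro k _
  congr 1
  exact_mod_cast ((PySem.List.sorted_perm arr (fun x => x) false).count_eq k).symm
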